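-- pv_equiv track=rewrite | github.com/ionite34/advent-of-code | src/aoc/2022/01/solution.py | part2
-- ===== SOURCE A (Python) =====
-- def part2(data):
--     bags = []
--     total = 0
--     for line in data:
--         if not line:
--             if total:
--                 bags.append(total)
--                 total = 0
--             continue
--         total += int(line)
--     # Top 3 bags
--     top3 = sorted(bags, reverse=True)[:3]
--     return sum(top3)
-- ===== SOURCE B (Python) =====
-- def part2(data):
--     top = []  # ascending list of at most 3 largest group totals seen so far
--     total = 0
--     for line in data:
--         if not line:
--             if total:
--                 i = 0
--                 while i < len(top) and top[i] < total:
--                     i += 1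
--                 top.insert(i, total)
--                 if len(top) > 3:
--                     top.pop(0)
--                 total = 0
--             continue
--         total += int(line)
--     return sum(top)
-- ===== Notes on version B (the rewrite author's own statement) =====
-- stated objective: alternative
-- what changed: Instead of collecting all group totals into a list and sorting it to take the top 3, B maintains a bounded ascending list of the current three largest totals online (insert into the 3-slot list, evict the smallest), so no bag list and no sort are ever built.
import Mathlib
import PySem

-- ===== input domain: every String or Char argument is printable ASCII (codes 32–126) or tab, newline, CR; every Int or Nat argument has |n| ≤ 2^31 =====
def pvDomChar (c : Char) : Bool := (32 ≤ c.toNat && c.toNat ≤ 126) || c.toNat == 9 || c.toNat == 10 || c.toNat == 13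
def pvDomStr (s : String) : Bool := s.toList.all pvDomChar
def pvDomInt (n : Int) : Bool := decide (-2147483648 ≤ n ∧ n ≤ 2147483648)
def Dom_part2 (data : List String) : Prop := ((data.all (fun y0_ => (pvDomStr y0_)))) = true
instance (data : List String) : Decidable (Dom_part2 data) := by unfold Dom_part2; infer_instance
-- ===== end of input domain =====

-- B replaces A's build-all-group-totals-then-sort by an online bounded top-3 list
-- (same group-accumulation loop, different selection structure); equivalence of the
-- RETURN value on inputs where every non-empty line parses as a Python int.

-- ===== PORT A =====
-- loop state: some (bags, total); none = int(line) raised ValueError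
def part2_stepA (s : Option (List Int × Int)) (line : String) : Option (List Int × Int) :=
  match s with
  | none => none
  | some (bags, total) =>
    if line = "" then
      if total ≠ 0 then some (bags ++ [total], 0) else some (bags, total)
    else
      match PySem.Int.ofStr? line with
      | some v => some (bags, total + v)
      | none => none

def part2 (data : List String) : Int :=
  match data.foldl part2_stepA (some ([], 0)) with
  | none => 0  -- int() raised; excluded by Pre_part2
  | some (bags, _) =>
    -- top3 = sorted(bags, reverse=True)[:3]; return sum(top3)
    (((PySem.List.sorted bags (fun x => x) true).take 3).sum)

-- ===== PORT B =====
-- top.insert at the first index whose element is not < x (the python while loop)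
def part2_insertAsc (x : Int) : List Int → List Int
  | [] => [x]
  | y :: ys => if y < x then y :: part2_insertAsc x ys else x :: y :: ys

-- insert, then pop(0) (drop the smallest) if more than 3 are held
def part2_push (t : List Int) (x : Int) : List Int :=
  let u := part2_insertAsc x t
  if 3 < u.length then u.tail else u

def part2_stepB (s : Option (List Int × Int)) (line : String) : Option (List Int × Int) :=
  match s with
  | none => none
  | some (top, total) =>
    if line = "" then
      if total ≠ 0 then some (part2_push top total, 0) else some (top, total)
    else
      match PySem.Int.ofStr? line with
      | some v => some (top, total + v)
      | none => none

def part2_alt (data : List String) : Int :=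
  match data.foldl part2_stepB (some ([], 0)) with
  | none => 0  -- int() raised; excluded by Pre_part2
  | some (top, _) => top.sum

-- ===== PRECONDITION & SPEC =====
-- Pre_ excludes inputs on which A raises ValueError: a non-empty line that int() cannot parse.
def Pre_part2 (data : List String) : Prop :=
  ∀ line ∈ data, line ≠ "" → (PySem.Int.ofStr? line).isSome = true
instance (data : List String) : Decidable (Pre_part2 data) := by unfold Pre_part2; infer_instance

def pvWitness_part2 : List String := ["100", "200", "", "300", "", " 42 ", "+8"]

def Spec_part2 (data : List String) (out : Int) : Prop := out = part2_alt data
instance (data : List String) (out : Int) : Decidable (Spec_part2 data out) := by unfold Spec_part2; infer_instance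

-- ===== CLAIM (what is proved, stated in full; the proofs are below) =====
def Claim_equal_part2 : Prop := ∀ (data : List String), Dom_part2 data → Pre_part2 data → Spec_part2 data (part2 data)

-- ===== LEMMAS AND PROOFS =====

-- proof-side descending insertion (used only to name the sorted order of A's bags)
def insDesc (x : Int) : List Int → List Int
  | [] => [x]
  | y :: ys => if y ≤ x then x :: y :: ys else y :: insDesc x ys

lemma insDesc_perm (x : Int) (l : List Int) : (insDesc x l).Perm (x :: l) := by
  induction l with
  | nil => simp [insDesc]
  | cons y ys ih =>
    simp only [insDesc]
    split_ifs with h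
    · exact List.Perm.refl _
    · exact (List.Perm.cons y ih).trans (List.Perm.swap x y ys)

lemma mem_insDesc {x z : Int} {l : List Int} (h : z ∈ insDesc x l) : z = x ∨ z ∈ l := by
  have := (insDesc_perm x l).mem_iff.mp h
  simpa using this

lemma insDesc_pairwise {x : Int} {l : List Int}
    (h : l.Pairwise (fun a b => b ≤ a)) : (insDesc x l).Pairwise (fun a b => b ≤ a) := by
  induction l with
  | nil => simp [insDesc]
  | cons y ys ih =>
    rcases List.pairwise_cons.mp h with ⟨hy, hys⟩
    simp only [insDesc]
    split_ifs with hle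
    · refine List.pairwise_cons.mpr ⟨?_, h⟩
      intro z hz
      rcases List.mem_cons.mp hz with rfl | hz
      · omega
      · exact le_trans (hy z hz) hle
    · refine List.pairwise_cons.mpr ⟨?_, ih hys⟩
      intro z hz
      rcases mem_insDesc hz with rfl | hz
      · omega
      · exact hy z hz

-- sorted(bs ++ [b], reverse=True) = insert b into sorted(bs, reverse=True)
lemma sorted_append_singleton (bs : List Int) (b : Int) :
    PySem.List.sorted (bs ++ [b]) (fun x => x) true
      = insDesc b (PySem.List.sorted bs (fun x => x) true) := by
  refine @List.Perm.eq_of_pairwise' Int (fun a b => b ≤ a) ⟨fun a b h1 h2 => le_antisymm h2 h1⟩ _ _ ?_ ?_ ?_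
  · simpa using PySem.List.sorted_pairwise_rev (xs := bs ++ [b]) (key := fun x => x)
  · exact insDesc_pairwise (by simpa using PySem.List.sorted_pairwise_rev (xs := bs) (key := fun x => x))
  · refine (PySem.List.sorted_perm _ _ _).trans ?_
    refine List.Perm.trans ?_ ((insDesc_perm b _).symm)
    refine List.Perm.trans (List.perm_append_comm) ?_
    exact List.Perm.cons b (PySem.List.sorted_perm _ _ _).symm

-- the online 3-slot push tracks the reversed top-3 of a descending-sorted list
lemma push_take3 {D : List Int} (hD : D.Pairwise (fun a b => b ≤ a)) (b : Int) :
    part2_push ((D.take 3).reverse) b = ((insDesc b D).take 3).reverse := by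
  match D with
  | [] => simp [part2_push, part2_insertAsc, insDesc]
  | [d1] =>
    by_cases k1 : d1 < b <;> by_cases l1 : d1 ≤ b <;>
      first
        | omega
        | (simp only [part2_push, part2_insertAsc, insDesc, List.take_succ_cons,
            List.take_nil, List.take_zero, List.reverse_cons, List.reverse_nil,
            List.nil_append, List.cons_append, k1, l1, if_true, if_false,
            List.length_cons, List.length_nil, List.tail_cons]
           <;> simp <;> omega)
  | [d1, d2] =>
    have h12 : d2 ≤ d1 := (List.pairwise_cons.mp hD).1 d2 (by simp)
    by_cases k1 : d1 < b <;> by_cases k2 : d2 < b <;>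
      by_cases l1 : d1 ≤ b <;> by_cases l2 : d2 ≤ b <;>
      first
        | omega
        | (simp only [part2_push, part2_insertAsc, insDesc, List.take_succ_cons,
            List.take_nil, List.take_zero, List.reverse_cons, List.reverse_nil,
            List.nil_append, List.cons_append, k1, k2, l1, l2, if_true, if_false,
            List.length_cons, List.length_nil, List.tail_cons]
           <;> simp <;> omega)
  | d1 :: d2 :: d3 :: rest =>
    have h12 : d2 ≤ d1 := (List.pairwise_cons.mp hD).1 d2 (by simp)
    have h23 : d3 ≤ d2 := (List.pairwise_cons.mp (List.pairwise_cons.mp hD).2).1 d3 (by simp)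
    by_cases k1 : d1 < b <;> by_cases k2 : d2 < b <;> by_cases k3 : d3 < b <;>
      by_cases l1 : d1 ≤ b <;> by_cases l2 : d2 ≤ b <;> by_cases l3 : d3 ≤ b <;>
      first
        | omega
        | (simp only [part2_push, part2_insertAsc, insDesc, List.take_succ_cons,
            List.take_zero, List.reverse_cons, List.reverse_nil, List.nil_append,
            List.cons_append, k1, k2, k3, l1, l2, l3, if_true, if_false,
            List.length_cons, List.length_nil, List.tail_cons]
           <;> simp <;> omega)

-- folding push over the bag list equals the reversed top-3 of the sorted bags
lemma foldl_push_eq (bags : List Int) :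
    List.foldl part2_push [] bags
      = ((PySem.List.sorted bags (fun x => x) true).take 3).reverse := by
  induction bags using List.reverseRecOn with
  | nil => decide
  | append_singleton bs b ih =>
    rw [List.foldl_append, List.foldl_cons, List.foldl_nil, ih,
      sorted_append_singleton]
    exact push_take3 (by simpa using PySem.List.sorted_pairwise_rev (xs := bs) (key := fun x => x)) b

-- relation between the two loop states
def part2_Rel : Option (List Int × Int) → Option (List Int × Int) → Prop
  | none, none => True
  | some (bags, t), some (top, t') => t = t' ∧ top = List.foldl part2_push [] bags
  | _, _ => False

lemma step_rel (sA sB : Option (List Int × Int)) (line : String) (h : part2_Rel sA sB) :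
    part2_Rel (part2_stepA sA line) (part2_stepB sB line) := by
  match sA, sB with
  | none, none => simp [part2_stepA, part2_stepB, part2_Rel]
  | some (bags, t), some (top, t') =>
    rcases h with ⟨rfl, rfl⟩
    simp only [part2_stepA, part2_stepB]
    split_ifs with hblank hnz
    · exact ⟨rfl, by rw [List.foldl_append]; rfl⟩
    · exact ⟨rfl, rfl⟩
    · cases PySem.Int.ofStr? line with
      | none => trivial
      | some v => exact ⟨rfl, rfl⟩
  | none, some _ => exact absurd h (by simp [part2_Rel])
  | some _, none => exact absurd h (by simp [part2_Rel])

lemma loop_rel (data : List String) (sA sB : Option (List Int × Int)) (h : part2_Rel sA sB) :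
    part2_Rel (data.foldl part2_stepA sA) (data.foldl part2_stepB sB) := by
  induction data generalizing sA sB with
  | nil => exact h
  | cons line rest ih => exact ih _ _ (step_rel sA sB line h)

-- ===== VERDICT (by name: the statement is the Claim_ definition above) =====
theorem part2_spec : Claim_equal_part2 := by
  intro data _ _
  unfold Spec_part2 part2 part2_alt
  have h := loop_rel data (some ([], 0)) (some ([], 0)) ⟨rfl, rfl⟩
  cases hA : data.foldl part2_stepA (some ([], 0)) with
  | none =>
    cases hB : data.foldl part2_stepB (some ([], 0)) with
    | none => rfl
    | some p => rw [hA, hB] at h; exact absurd h (by simp [part2_Rel])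
  | some p =>
    obtain ⟨bags, t⟩ := p
    cases hB : data.foldl part2_stepB (some ([], 0)) with
    | none => rw [hA, hB] at h; exact absurd h (by simp [part2_Rel])
    | some q =>
      obtain ⟨top, t'⟩ := q
      rw [hA, hB] at h
      rcases h with ⟨rfl, rfl⟩
      rw [foldl_push_eq]; simp [List.sum_reverse]
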